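-- pv_equiv track=rewrite | github.com/MrBrantCode/unitest_baseline | mut_generate/mist_train_taco/taco_3044/solution.py | simplify_number
-- ===== SOURCE A (Python) =====
-- def simplify_number(n: int) -> str:
--     output = []
--     exp = 0
--     while n:
--         (n, r) = divmod(n, 10)
--         if r:
--             output.append(f'{r}*{10 ** exp}' if exp else f'{r}')
--         exp += 1
--     return '+'.join(output[::-1])
-- ===== SOURCE B (Python) =====
-- def simplify_number(n: int) -> str:
--     p = 1
--     while p * 10 <= n:
--         p *= 10
--     parts = []
--     while p:
--         d = n // p
--         n = n % p
--         if d: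
--             parts.append(f'{d}*{p}' if p > 1 else f'{d}')
--         p //= 10
--     return '+'.join(parts)
-- ===== Notes on version B (the rewrite author's own statement) =====
-- stated objective: alternative
-- what changed: B replaces A's least-significant-first divmod digit extraction followed by a list reversal with a most-significant-first greedy scan that first finds the largest power of ten <= n and then peels digits top-down, emitting terms directly in output order (and formatting with the maintained power p instead of recomputing 10**exp).
import Mathlib
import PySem

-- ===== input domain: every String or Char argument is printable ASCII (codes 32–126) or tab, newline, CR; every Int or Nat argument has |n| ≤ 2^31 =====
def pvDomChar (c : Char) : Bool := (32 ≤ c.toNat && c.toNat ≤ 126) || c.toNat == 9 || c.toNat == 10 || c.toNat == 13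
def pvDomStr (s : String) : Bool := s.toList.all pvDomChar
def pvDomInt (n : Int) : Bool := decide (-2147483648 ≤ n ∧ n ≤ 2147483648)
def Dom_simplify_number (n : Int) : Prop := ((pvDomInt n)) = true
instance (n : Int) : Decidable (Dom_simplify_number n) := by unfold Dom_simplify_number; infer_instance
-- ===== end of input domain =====

-- B replaces A's LSB-first divmod extraction + final list reversal by an MSB-first greedy
-- scan that maintains the current power of ten and emits the terms already in output order
-- (objective: alternative; same asymptotic cost). Equivalence is claimed on 0 ≤ n, where A terminates.

-- ===== PORT A =====

-- f'{r}*{10 ** exp}' if exp else f'{r}'  (built on char lists: Lean's String.append is kernel-opaque)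
def pvFmtA (r : Int) (exp : Nat) : String :=
  if exp ≠ 0 then String.ofList (PySem.Int.toChars r ++ '*' :: PySem.Int.toChars ((10 : Int) ^ exp))
  else String.ofList (PySem.Int.toChars r)

-- the `while n:` loop; fuel only totalises it (Python diverges for n < 0, outside Pre_);
-- `exp` is A's nonnegative counter, kept as a Nat so that `10 ** exp` is Int power.
def pvLoopA : Nat → Int → Nat → List String → List String
  | 0, _, _, out => out
  | fuel + 1, n, exp, out =>
    if n = 0 then out
    else
      pvLoopA fuel (PySem.Int.floordiv n 10) (exp + 1)
        (out ++ if PySem.Int.mod n 10 ≠ 0 then [pvFmtA (PySem.Int.mod n 10) exp] else [])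

-- output[::-1] is List.reverse (PySem.List.slice?_none_none_neg_one)
def simplify_number (n : Int) : String :=
  PySem.Str.join "+" (pvLoopA (n.natAbs + 1) n 0 []).reverse

-- ===== PORT B =====

-- f'{d}*{p}' if p > 1 else f'{d}'
def pvFmtB (d p : Int) : String :=
  if p > 1 then String.ofList (PySem.Int.toChars d ++ '*' :: PySem.Int.toChars p)
  else String.ofList (PySem.Int.toChars d)

-- `p = 1; while p * 10 <= n: p *= 10`; the 0 < p conjunct only totalises (p starts at 1)
def pvPowB (p n : Int) : Int :=
  if _h : 0 < p ∧ p * 10 ≤ n then pvPowB (p * 10) n else p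
termination_by (n - p).toNat
decreasing_by omega

-- `while p: d = n // p; n = n % p; if d: parts.append(...); p //= 10`
-- (`while p` written as 0 < p, which only totalises: in B p only ever holds a positive power of ten or zero)
def pvLoopB (p n : Int) (parts : List String) : List String :=
  if _h : 0 < p then
    pvLoopB (PySem.Int.floordiv p 10) (PySem.Int.mod n p)
      (parts ++ if PySem.Int.floordiv n p ≠ 0 then [pvFmtB (PySem.Int.floordiv n p) p] else [])
  else parts
termination_by p.toNat
decreasing_by
  have h10 : PySem.Int.floordiv p 10 = p / 10 := PySem.Int.floordiv_eq_ediv_of_pos (by omega)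
  have hp : p = ((p.toNat : Nat) : Int) := by omega
  have : p / 10 = ((p.toNat / 10 : Nat) : Int) := by rw [hp]; push_cast; rfl
  have hlt : p.toNat / 10 < p.toNat := Nat.div_lt_self (by omega) (by omega)
  omega

def simplify_number_alt (n : Int) : String :=
  PySem.Str.join "+" (pvLoopB (pvPowB 1 n) n [])

-- ===== PRECONDITION & SPEC =====
-- Pre_ excludes n < 0, on which A's while loop never terminates (divmod(n, 10) stalls at -1).
def Pre_simplify_number (n : Int) : Prop := 0 ≤ n
instance (n : Int) : Decidable (Pre_simplify_number n) := by unfold Pre_simplify_number; infer_instance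
def pvWitness_simplify_number : Int := (10203)

def Spec_simplify_number (n : Int) (out : String) : Prop := out = simplify_number_alt n
instance (n : Int) (out : String) : Decidable (Spec_simplify_number n out) := by unfold Spec_simplify_number; infer_instance

-- ===== CLAIM (what is proved, stated in full; the proofs are below) =====
def Claim_equal_simplify_number : Prop := ∀ (n : Int), Dom_simplify_number n → Pre_simplify_number n → Spec_simplify_number n (simplify_number n)

-- ===== LEMMAS AND PROOFS =====

-- the terms of m, most-significant first, lowest position carrying exponent e
def pvTerms : Nat → Nat → List String
  | m, e =>
    if _h : m = 0 then []
    else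
      pvTerms (m / 10) (e + 1) ++ if m % 10 ≠ 0 then [pvFmtA ((m % 10 : Nat) : Int) e] else []
termination_by m _ => m
decreasing_by exact Nat.div_lt_self (by omega) (by omega)

theorem pvTerms_zero (e : Nat) : pvTerms 0 e = [] := by rw [pvTerms]; simp

theorem pvLoopA_eq (fuel : Nat) : ∀ (m e : Nat) (out : List String), m < fuel →
    pvLoopA fuel (m : Int) e out = out ++ (pvTerms m e).reverse := by
  induction fuel with
  | zero => intro m e out h; omega
  | succ fuel ih =>
    intro m e out h
    by_cases hm : m = 0
    · subst hm; simp [pvLoopA, pvTerms_zero]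
    · have hdiv : PySem.Int.floordiv (m : Int) 10 = ((m / 10 : Nat) : Int) := by
        rw [PySem.Int.floordiv_eq_ediv_of_pos (by omega)]; push_cast; rfl
      have hmod : PySem.Int.mod (m : Int) 10 = ((m % 10 : Nat) : Int) := by
        rw [PySem.Int.mod_eq_emod_of_pos (by omega)]; push_cast; rfl
      have hcast : ((m : Int) = 0) = False := by simp [hm]
      have hfuel : m / 10 < fuel := by
        have := Nat.div_lt_self (show 0 < m by omega) (show 1 < 10 by omega); omega
      rw [pvLoopA, if_neg (by exact_mod_cast hm), hdiv, hmod]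
      rw [ih (m / 10) (e + 1) _ hfuel]
      have hT : pvTerms m e = pvTerms (m / 10) (e + 1) ++
          (if m % 10 ≠ 0 then [pvFmtA ((m % 10 : Nat) : Int) e] else []) := by
        rw [pvTerms]; rw [dif_neg hm]
      rw [hT, List.reverse_append, List.append_assoc]
      congr 1
      simp only [ne_eq, Nat.cast_eq_zero]
      by_cases hc : m % 10 = 0 <;> simp [hc]

-- peeling the TOP digit off pvTerms: for m < 10^(k+1),
-- pvTerms m e = (top term at exponent k+e) ++ pvTerms (m % 10^k) e
theorem pvTerms_top : ∀ (k e m : Nat), m < 10 ^ (k + 1) →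
    pvTerms m e =
      (if m / 10 ^ k ≠ 0 then [pvFmtA ((m / 10 ^ k : Nat) : Int) (k + e)] else [])
        ++ pvTerms (m % 10 ^ k) e := by
  intro k
  induction k with
  | zero =>
    intro e m h
    have h' : m < 10 := by simpa using h
    simp only [pow_zero, Nat.div_one, Nat.mod_one]
    by_cases hm : m = 0
    · subst hm; simp [pvTerms_zero]
    · rw [pvTerms, dif_neg hm]
      have h10 : m / 10 = 0 := Nat.div_eq_of_lt h'
      have hmod : m % 10 = m := Nat.mod_eq_of_lt h'
      rw [h10, pvTerms_zero, hmod, pvTerms_zero]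
      simp [hm]
  | succ k ih =>
    intro e m h
    by_cases hm : m = 0
    · subst hm; simp [pvTerms_zero]
    · have hdd : m / 10 / 10 ^ k = m / 10 ^ (k + 1) := by
        rw [Nat.div_div_eq_div_mul, ← pow_succ']
      have hmd : m / 10 % 10 ^ k = m % 10 ^ (k + 1) / 10 := by
        have := Nat.mod_mul_right_div_self m 10 (10 ^ k)
        rw [← pow_succ'] at this
        exact this.symm
      have hmm : m % 10 = m % 10 ^ (k + 1) % 10 :=
        (Nat.mod_mod_of_dvd m (dvd_pow_self 10 (by omega))).symm
      have hlt : m / 10 < 10 ^ (k + 1) := by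
        rw [pow_succ] at h
        omega
      rw [pvTerms, dif_neg hm, ih (e + 1) (m / 10) hlt, hdd, hmd, hmm,
        show k + (e + 1) = k + 1 + e by omega]
      have hkey : pvTerms (m % 10 ^ (k + 1) / 10) (e + 1) ++
          (if m % 10 ^ (k + 1) % 10 ≠ 0 then
            [pvFmtA ((m % 10 ^ (k + 1) % 10 : Nat) : Int) e] else [])
          = pvTerms (m % 10 ^ (k + 1)) e := by
        by_cases hx : m % 10 ^ (k + 1) = 0
        · rw [hx]; simp [pvTerms_zero]
        · conv_rhs => rw [pvTerms]
          rw [dif_neg hx]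
      rw [List.append_assoc, hkey]

theorem pow_cast (k : Nat) : (10 : Int) ^ k = ((10 ^ k : Nat) : Int) := by push_cast; rfl

theorem pvFmtB_eq (d k : Nat) : pvFmtB ((d : Nat) : Int) ((10 : Int) ^ k) = pvFmtA ((d : Nat) : Int) k := by
  cases k with
  | zero => simp [pvFmtB, pvFmtA]
  | succ k =>
    have h1 : (1 : Int) < (10 : Int) ^ (k + 1) := by
      calc (1:Int) < 10 := by omega
        _ ≤ (10:Int) ^ (k+1) := le_self_pow₀ (by omega) (by omega)
    simp [pvFmtB, pvFmtA, h1]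

theorem pvLoopB_eq : ∀ (k m : Nat) (parts : List String), m < 10 ^ (k + 1) →
    pvLoopB ((10 : Int) ^ k) (m : Int) parts = parts ++ pvTerms m 0 := by
  intro k
  induction k with
  | zero =>
    intro m parts h
    rw [pvLoopB, dif_pos (by norm_num)]
    simp only [pow_zero]
    have hd : PySem.Int.floordiv (m : Int) 1 = ((m : Nat) : Int) := by
      rw [PySem.Int.floordiv_eq_ediv_of_pos (by omega)]; simp
    have hm1 : PySem.Int.mod (m : Int) 1 = ((0 : Nat) : Int) := by
      rw [PySem.Int.mod_eq_emod_of_pos (by omega)]; simp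
    have hp1 : PySem.Int.floordiv (1 : Int) 10 = 0 := by decide
    rw [hd, hm1, hp1, pvLoopB, dif_neg (by omega)]
    rw [pvTerms]
    by_cases hm : m = 0
    · subst hm; simp
    · rw [dif_neg hm]
      have h10 : m / 10 = 0 := Nat.div_eq_of_lt (by simpa using h)
      have hmod : m % 10 = m := Nat.mod_eq_of_lt (by simpa using h)
      rw [h10, pvTerms_zero, hmod]
      have := pvFmtB_eq m 0
      simp only [pow_zero] at this
      simp [hm, this]
  | succ k ih =>
    intro m parts h
    have hppos : (0 : Int) < (10 : Int) ^ (k + 1) := by positivity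
    rw [pvLoopB, dif_pos hppos]
    have hd : PySem.Int.floordiv (m : Int) ((10 : Int) ^ (k + 1)) = ((m / 10 ^ (k + 1) : Nat) : Int) := by
      rw [PySem.Int.floordiv_eq_ediv_of_pos hppos, pow_cast]; push_cast; rfl
    have hm1 : PySem.Int.mod (m : Int) ((10 : Int) ^ (k + 1)) = ((m % 10 ^ (k + 1) : Nat) : Int) := by
      rw [PySem.Int.mod_eq_emod_of_pos hppos, pow_cast]; push_cast; rfl
    have hp1 : PySem.Int.floordiv ((10 : Int) ^ (k + 1)) 10 = (10 : Int) ^ k := by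
      rw [PySem.Int.floordiv_eq_ediv_of_pos (by omega), pow_succ]
      exact Int.mul_ediv_cancel _ (by omega)
    have hlt : m % 10 ^ (k + 1) < 10 ^ (k + 1) := Nat.mod_lt _ (by positivity)
    rw [hd, hm1, hp1, ih (m % 10 ^ (k + 1)) _ hlt]
    rw [pvTerms_top (k + 1) 0 m h, List.append_assoc]
    congr 1
    congr 1
    have hf := pvFmtB_eq (m / 10 ^ (k + 1)) (k + 1)
    simp only [ne_eq, Nat.cast_eq_zero]
    by_cases hc : m / 10 ^ (k + 1) = 0
    · simp [hc]
    · rw [if_pos hc, if_pos hc, hf]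

theorem pvPowB_spec (m : Nat) : ∀ (t j : Nat), m - 10 ^ j ≤ t →
    ∃ k, pvPowB ((10 : Int) ^ j) (m : Int) = (10 : Int) ^ k ∧ m < 10 ^ (k + 1) := by
  have hcond : ∀ j : Nat, ((10 : Int) ^ j * 10 ≤ (m : Int)) ↔ (10 ^ j * 10 ≤ m) := by
    intro j
    rw [show (10 : Int) ^ j * 10 = ((10 ^ j * 10 : Nat) : Int) by push_cast; ring]
    exact Nat.cast_le
  intro t
  induction t with
  | zero =>
    intro j hj
    have hpow : 1 ≤ 10 ^ j := Nat.one_le_pow _ _ (by omega)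
    refine ⟨j, ?_, by rw [pow_succ]; omega⟩
    rw [pvPowB, dif_neg]
    rintro ⟨-, hle⟩
    rw [hcond j] at hle
    omega
  | succ t ih =>
    intro j hj
    by_cases h : 10 ^ j * 10 ≤ m
    · have hpow : 1 ≤ 10 ^ j := Nat.one_le_pow _ _ (by omega)
      have hrec := ih (j + 1) (by rw [pow_succ]; omega)
      rw [pvPowB, dif_pos ⟨by positivity, (hcond j).mpr h⟩, ← pow_succ]
      exact hrec
    · refine ⟨j, ?_, by rw [pow_succ]; omega⟩
      rw [pvPowB, dif_neg]
      rintro ⟨-, hle⟩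
      rw [hcond j] at hle
      omega

-- ===== VERDICT (by name: the statement is the Claim_ definition above) =====
theorem simplify_number_spec : Claim_equal_simplify_number := by
  intro n _ hpre
  unfold Spec_simplify_number simplify_number simplify_number_alt
  have h0 : (0 : Int) ≤ n := hpre
  obtain ⟨m, rfl⟩ : ∃ m : Nat, n = (m : Int) := ⟨n.toNat, by omega⟩
  have hA := pvLoopA_eq (((m : Int)).natAbs + 1) m 0 [] (by simp)
  rw [hA, List.nil_append, List.reverse_reverse]
  obtain ⟨k, hk, hklt⟩ := pvPowB_spec m m 0 (by simp)
  rw [show (1 : Int) = (10 : Int) ^ 0 by norm_num, hk, pvLoopB_eq k m [] hklt, List.nil_append]
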